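-- pv_equiv track=rewrite | github.com/gotwit/Python | DS/Dictionary/Prog-CheckPatternCharOrder.py | followPattern
-- ===== SOURCE A (Python) =====
-- def followPattern(str, patt):
--     patternSet = set()
--
--     for i in range(len(patt)):
--         patternSet.add(patt[i])
--
--     modifiedStr = str
--
--     for i in range(len(str) - 1, -1, -1):
--         if not modifiedStr[i] in patternSet:
--             modifiedStr = modifiedStr[:i] + modifiedStr[i + 1:]
--
--     for i in range(len(modifiedStr) - 1, 0, -1):
--         if modifiedStr[i] == modifiedStr[i - 1]:
--             modifiedStr = modifiedStr[:i] + modifiedStr[i + 1:]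
--
--     if len(patt) != len(modifiedStr):
--         return False
--
--     for i in range(len(patt)):
--         if patt[i] != modifiedStr[i]:
--             return False
--     return True
-- ===== SOURCE B (Python) =====
-- def followPattern(str, patt):
--     pset = set(patt)
--     kept = []
--     for ch in str:
--         if ch in pset and (not kept or kept[-1] != ch):
--             kept.append(ch)
--     return ''.join(kept) == patt
-- ===== Notes on version B (the rewrite author's own statement) =====
-- stated objective: faster
-- what changed: Replaces the two backward index loops that delete characters by repeated string slicing (quadratic) with one forward pass that keeps a pattern character only when it differs from the last kept one, then a single string comparison.
import Mathlib
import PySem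

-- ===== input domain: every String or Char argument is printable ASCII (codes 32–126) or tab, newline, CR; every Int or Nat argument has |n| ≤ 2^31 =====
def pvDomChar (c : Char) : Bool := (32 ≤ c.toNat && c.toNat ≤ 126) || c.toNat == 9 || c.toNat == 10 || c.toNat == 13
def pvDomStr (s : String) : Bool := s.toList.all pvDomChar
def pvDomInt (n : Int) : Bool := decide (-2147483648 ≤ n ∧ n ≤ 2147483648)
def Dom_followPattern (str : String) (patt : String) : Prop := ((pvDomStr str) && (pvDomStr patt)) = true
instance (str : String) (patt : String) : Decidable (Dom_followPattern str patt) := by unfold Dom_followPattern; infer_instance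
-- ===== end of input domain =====

-- B replaces A's two backward index loops that delete characters by repeated whole-string slicing
-- (quadratic) with one forward pass keeping a pattern character only when it differs from the last
-- kept one, then a single comparison (objective: faster, asymptotic).

-- ===== PORT A =====
-- literal transliteration of A: set built by an index loop, two backward deletion loops via slicing,
-- then a length check and an index-by-index comparison loop (early return False ≡ `all`).
def followPattern (str : String) (patt : String) : Bool :=
  let pl := patt.toList
  let sl := str.toList
  let patternSet : PySem.Set Char :=
    (PySem.List.pyRange 0 (pl.length : Int) 1).foldl
      (fun s i => PySem.Set.add s (PySem.List.pyGetD pl i ' ')) PySem.Set.empty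
  let ms1 : List Char :=
    (PySem.List.pyRange ((sl.length : Int) - 1) (-1) (-1)).foldl
      (fun ms i =>
        if ¬ PySem.Set.contains patternSet (PySem.List.pyGetD ms i ' ') then
          PySem.List.slice ms none (some i) ++ PySem.List.slice ms (some (i + 1)) none
        else ms) sl
  let ms2 : List Char :=
    (PySem.List.pyRange ((ms1.length : Int) - 1) 0 (-1)).foldl
      (fun ms i =>
        if PySem.List.pyGetD ms i ' ' = PySem.List.pyGetD ms (i - 1) ' ' then
          PySem.List.slice ms none (some i) ++ PySem.List.slice ms (some (i + 1)) none
        else ms) ms1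
  if pl.length ≠ ms2.length then false
  else (PySem.List.pyRange 0 (pl.length : Int) 1).all
    (fun i => PySem.List.pyGetD pl i ' ' == PySem.List.pyGetD ms2 i ' ')

-- ===== PORT B =====
-- literal transliteration of B: one forward fold appending ch when ch ∈ set(patt) and ch differs
-- from the last kept char; ''.join(kept) == patt is the list comparison kept == patt.toList.
def followPattern_alt (str : String) (patt : String) : Bool :=
  let pset : PySem.Set Char := PySem.Set.ofList patt.toList
  let kept : List Char := str.toList.foldl
    (fun kept ch =>
      if PySem.Set.contains pset ch && !(kept.getLast? == some ch) then kept ++ [ch]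
      else kept) []
  kept == patt.toList

-- ===== PRECONDITION & SPEC =====
def Spec_followPattern (str : String) (patt : String) (out : Bool) : Prop := out = followPattern_alt str patt
instance (str : String) (patt : String) (out : Bool) : Decidable (Spec_followPattern str patt out) := by unfold Spec_followPattern; infer_instance

-- ===== CLAIM (what is proved, stated in full; the proofs are below) =====
def Claim_equal_followPattern : Prop := ∀ (str : String) (patt : String), Dom_followPattern str patt → Spec_followPattern str patt (followPattern str patt)

-- ===== LEMMAS AND PROOFS =====

-- collapse of consecutive duplicates, keeping the first of each run; cT carries the last kept char
def cT (c : Char) : List Char → List Char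
  | [] => []
  | x :: xs => if x = c then cT c xs else x :: cT x xs

def collapse : List Char → List Char
  | [] => []
  | x :: xs => x :: cT x xs

-- elementary facts used by both fold invariants
theorem take_append_take (l r : List Char) (k : Nat) (h : k < l.length) :
    (l.take (k+1) ++ r).take k = l.take k := by
  rw [List.take_append_of_le_length (by simp; omega), List.take_take]; simp

theorem drop_append_take (l r : List Char) (k : Nat) (h : k < l.length) :
    (l.take (k+1) ++ r).drop (k+1) = r := by
  have h1 : (l.take (k+1)).length = k+1 := by simp; omega
  calc (l.take (k+1) ++ r).drop (k+1)
      = (l.take (k+1) ++ r).drop (l.take (k+1)).length := by rw [h1]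
    _ = r := List.drop_left


theorem pyGetD_take_append (l r : List Char) (k j : Nat) (hj : j ≤ k) (h : k < l.length) (d : Char) :
    PySem.List.pyGetD (l.take (k+1) ++ r) (j : Int) d = l[j] := by
  rw [PySem.List.pyGetD_eq_getElem _ d (by omega) (by simp; omega)]
  have hlt : (j : Int).toNat < (l.take (k+1)).length := by simp; omega
  rw [List.getElem_append_left hlt]
  simp [List.getElem_take]

theorem getLast?_take (l : List Char) (k : Nat) (h : k < l.length) :
    (l.take (k+1)).getLast? = some l[k] := by
  rw [List.getLast?_eq_getElem?]
  simp [Nat.min_eq_left (by omega : k + 1 ≤ l.length)]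

theorem cT_snoc (xs : List Char) (c a : Char) :
    cT c (xs ++ [a]) = cT c xs ++ (if a = (xs.getLast?).getD c then [] else [a]) := by
  induction xs generalizing c with
  | nil => simp [cT]
  | cons x xs ih =>
    by_cases hx : x = c
    · simp only [List.cons_append, cT, if_pos hx, ih c, List.getLast?_cons]
      subst hx
      cases xs.getLast? <;> simp
    · simp only [List.cons_append, cT, if_neg hx, ih x, List.getLast?_cons]
      cases xs.getLast? <;> simp

theorem collapse_snoc (xs : List Char) (a : Char) :
    collapse (xs ++ [a]) = collapse xs ++ (if xs.getLast? = some a then [] else [a]) := by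
  cases xs with
  | nil => simp [collapse, cT]
  | cons y ys =>
    simp only [List.cons_append, collapse, cT_snoc, List.getLast?_cons]
    cases ys.getLast? <;> simp [eq_comm]

-- A's first loop = List.filter
theorem loop1_eq_filter (p : Char → Bool) (l : List Char) (k : Nat) (hk : k ≤ l.length)
    (r : List Char) :
    (PySem.List.pyRange ((k : Int) - 1) (-1) (-1)).foldl
      (fun ms i =>
        if ¬ (p (PySem.List.pyGetD ms i ' ') = true) then
          PySem.List.slice ms none (some i) ++ PySem.List.slice ms (some (i + 1)) none
        else ms) (l.take k ++ r)
    = (l.take k).filter p ++ r := by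
  induction k generalizing r with
  | zero =>
    rw [PySem.List.pyRange_neg_one_eq_nil (by omega)]
    simp
  | succ k ih =>
    have hk' : k < l.length := by omega
    rw [show ((k+1 : Nat) : Int) - 1 = (k : Int) from by push_cast; ring,
        PySem.List.pyRange_neg_one_cons (by omega : (-1 : Int) < (k : Int)),
        List.foldl_cons]
    rw [pyGetD_take_append l r k k (le_refl k) hk']
    have hsl1 : PySem.List.slice (l.take (k+1) ++ r) none (some (k : Int)) = l.take k := by
      rw [PySem.List.slice_to _ (by omega)]
      simpa using take_append_take l r k hk'
    have hsl2 : PySem.List.slice (l.take (k+1) ++ r) (some ((k : Int) + 1)) none = r := by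
      rw [PySem.List.slice_from _ (by omega)]
      have : ((k : Int) + 1).toNat = k + 1 := by omega
      rw [this]
      exact drop_append_take l r k hk'
    have hsucc : l.take (k+1) ++ r = l.take k ++ (l[k] :: r) := by
      rw [List.take_succ_eq_append_getElem hk', List.append_assoc, List.singleton_append]
    have hfsucc : (l.take (k+1)).filter p
        = (l.take k).filter p ++ (if p l[k] then [l[k]] else []) := by
      rw [List.take_succ_eq_append_getElem hk', List.filter_append]
      cases hpk : p l[k] <;> simp [List.filter, hpk]
    by_cases hp : p l[k] = true
    · rw [if_neg (by simp [hp]), hsucc, ih (by omega) (l[k] :: r), hfsucc]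
      simp [hp]
    · rw [if_pos (by simp [hp]), hsl1, hsl2, ih (by omega) r, hfsucc]
      simp [hp]

-- A's second loop = collapse
theorem loop2_eq_collapse (l : List Char) (k : Nat) (hk : k ≤ l.length) (r : List Char) :
    (PySem.List.pyRange ((k : Int) - 1) 0 (-1)).foldl
      (fun ms i =>
        if PySem.List.pyGetD ms i ' ' = PySem.List.pyGetD ms (i - 1) ' ' then
          PySem.List.slice ms none (some i) ++ PySem.List.slice ms (some (i + 1)) none
        else ms) (l.take k ++ r)
    = collapse (l.take k) ++ r := by
  induction k generalizing r with
  | zero =>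
    rw [PySem.List.pyRange_neg_one_eq_nil (by omega)]
    simp [collapse]
  | succ k ih =>
    match k, hk with
    | 0, hk =>
      rw [PySem.List.pyRange_neg_one_eq_nil (by omega)]
      match l, hk with
      | a :: t, _ => simp [collapse, cT]
    | j+1, hk =>
      have hj1 : j + 1 < l.length := by omega
      have ihr : ∀ r' : List Char,
          List.foldl
            (fun ms i =>
              if PySem.List.pyGetD ms i ' ' = PySem.List.pyGetD ms (i - 1) ' ' then
                PySem.List.slice ms none (some i) ++ PySem.List.slice ms (some (i + 1)) none
              else ms)
            (l.take (j+1) ++ r') (PySem.List.pyRange (j : Int) 0 (-1))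
          = collapse (l.take (j+1)) ++ r' := by
        intro r'
        have := ih (by omega) r'
        rwa [show ((j+1 : Nat) : Int) - 1 = (j : Int) from by push_cast; ring] at this
      rw [show ((j+1+1 : Nat) : Int) - 1 = ((j+1 : Nat) : Int) from by push_cast; ring,
          PySem.List.pyRange_neg_one_cons (by push_cast; omega : (0 : Int) < ((j+1 : Nat) : Int)),
          List.foldl_cons]
      rw [pyGetD_take_append l r (j+1) (j+1) (le_refl _) hj1,
          show ((j+1 : Nat) : Int) - 1 = (j : Int) from by push_cast; ring,
          pyGetD_take_append l r (j+1) j (by omega) hj1]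
      have hsl1 : PySem.List.slice (l.take (j+1+1) ++ r) none (some ((j+1 : Nat) : Int))
          = l.take (j+1) := by
        rw [PySem.List.slice_to _ (by omega)]
        have h2 : (((j+1 : Nat) : Int)).toNat = j + 1 := by omega
        rw [h2]
        exact take_append_take l r (j+1) hj1
      have hsl2 : PySem.List.slice (l.take (j+1+1) ++ r) (some (((j+1 : Nat) : Int) + 1)) none
          = r := by
        rw [PySem.List.slice_from _ (by omega)]
        have h2 : (((j+1 : Nat) : Int) + 1).toNat = j + 1 + 1 := by omega
        rw [h2]
        exact drop_append_take l r (j+1) hj1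
      have hsucc : l.take (j+1+1) ++ r = l.take (j+1) ++ (l[j+1] :: r) := by
        rw [List.take_succ_eq_append_getElem hj1, List.append_assoc, List.singleton_append]
      have hcol : collapse (l.take (j+1+1))
          = collapse (l.take (j+1)) ++ (if l[j] = l[j+1] then [] else [l[j+1]]) := by
        rw [List.take_succ_eq_append_getElem hj1, collapse_snoc,
            getLast?_take l j (by omega)]
        simp
      by_cases he : l[j+1] = l[j]
      · rw [if_pos he, hsl1, hsl2, ihr r, hcol, if_pos he.symm]
        simp
      · rw [if_neg he, hsucc, ihr (l[j+1] :: r), hcol,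
            if_neg (fun hc => he hc.symm)]
        simp

-- B's fold = collapse ∘ filter
theorem bfold_eq (p : Char → Bool) (l : List Char) (acc : List Char) :
    l.foldl (fun kept ch =>
      if p ch && !(kept.getLast? == some ch) then kept ++ [ch] else kept) acc
    = acc ++ (match acc.getLast? with
              | none => collapse (l.filter p)
              | some c => cT c (l.filter p)) := by
  induction l generalizing acc with
  | nil => cases acc.getLast? <;> simp [collapse, cT]
  | cons x xs ih =>
    simp only [List.foldl_cons, List.filter_cons]
    by_cases hp : p x = true
    · cases hacc : acc.getLast? with
      | none =>
        have hnil : acc = [] := List.getLast?_eq_none_iff.mp hacc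
        rw [if_pos (by simp [hp, hacc])]
        rw [ih (acc ++ [x])]
        simp [hnil, hp, collapse]
      | some c =>
        by_cases hc : c = x
        · rw [if_neg (by simp [hp, hc])]
          rw [ih acc, hacc]
          simp [hp, hc, cT]
        · rw [if_pos (by simp [hp, hc])]
          rw [ih (acc ++ [x]), List.getLast?_concat]
          have hxc : ¬ x = c := fun h => hc h.symm
          simp [hp, cT, hxc, List.append_assoc]
    · rw [if_neg (by simp [hp])]
      rw [ih acc]
      simp [hp]

-- A's final comparison = list equality
theorem cmp_eq (pl ms : List Char) :
    (if pl.length ≠ ms.length then false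
     else (PySem.List.pyRange 0 (pl.length : Int) 1).all
       (fun i => PySem.List.pyGetD pl i ' ' == PySem.List.pyGetD ms i ' '))
    = (pl == ms) := by
  by_cases hl : pl.length = ms.length
  · rw [if_neg (by simp [hl])]
    apply Bool.eq_iff_iff.mpr
    simp only [List.all_eq_true, PySem.List.mem_pyRange_one, beq_iff_eq]
    constructor
    · intro h
      apply List.ext_getElem hl
      intro k h1 h2
      have := h (k : Int) ⟨by omega, by omega⟩
      rwa [PySem.List.pyGetD_eq_getElem _ _ (by omega) (by omega),
           PySem.List.pyGetD_eq_getElem _ _ (by omega) (by omega)] at this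
    · intro h i hi
      subst h
      rfl
  · rw [if_pos (by simp [hl])]
    have : pl ≠ ms := fun h => hl (by rw [h])
    simp [this]

-- ===== VERDICT (by name: the statement is the Claim_ definition above) =====
theorem followPattern_spec : Claim_equal_followPattern := by
  unfold Claim_equal_followPattern Spec_followPattern
  intro str patt _
  simp only [followPattern, followPattern_alt]
  rw [PySem.List.foldl_pyRange_zero_pyGetD' patt.toList ' ' PySem.Set.add PySem.Set.empty]
  rw [show (PySem.Set.empty : PySem.Set Char) = [] from rfl, ← PySem.Set.ofList_eq_foldl]
  have h1 : (PySem.List.pyRange ((str.toList.length : Int) - 1) (-1) (-1)).foldl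
      (fun ms i =>
        if ¬ (PySem.Set.contains (PySem.Set.ofList patt.toList) (PySem.List.pyGetD ms i ' ') = true) then
          PySem.List.slice ms none (some i) ++ PySem.List.slice ms (some (i + 1)) none
        else ms) str.toList
      = str.toList.filter (fun c => PySem.Set.contains (PySem.Set.ofList patt.toList) c) := by
    have := loop1_eq_filter (fun c => PySem.Set.contains (PySem.Set.ofList patt.toList) c)
      str.toList str.toList.length (le_refl _) []
    simp only [List.take_length, List.append_nil] at this; exact this
  rw [h1]
  set fl := str.toList.filter (fun c => PySem.Set.contains (PySem.Set.ofList patt.toList) c) with hfl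
  have h2 : (PySem.List.pyRange ((fl.length : Int) - 1) 0 (-1)).foldl
      (fun ms i =>
        if PySem.List.pyGetD ms i ' ' = PySem.List.pyGetD ms (i - 1) ' ' then
          PySem.List.slice ms none (some i) ++ PySem.List.slice ms (some (i + 1)) none
        else ms) fl
      = collapse fl := by
    have := loop2_eq_collapse fl fl.length (le_refl _) []
    simp only [List.take_length, List.append_nil] at this; exact this
  rw [h2, cmp_eq]
  have h3 := bfold_eq (fun c => PySem.Set.contains (PySem.Set.ofList patt.toList) c) str.toList []
  simp only [List.getLast?_nil, List.nil_append] at h3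
  rw [h3, ← hfl]
  simp [eq_comm]
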